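-- pv_equiv track=rewrite | github.com/Aditi187/Air-Gapped-Codebase-Modernization-Engine | core/parser.py | _compute_modernization_priority
-- ===== SOURCE A (Python) =====
-- from typing import Any, Iterable
--
-- def _compute_modernization_priority(function_map: dict[str, dict[str, Any]]) -> list[str]:
--     leaves: list[str] = []
--     roots: list[str] = []
--     middles: list[str] = []
--
--     for fqn, meta in function_map.items():
--         in_degree = int(meta.get("incoming_calls_count", 0))
--         out_degree = int(meta.get("outgoing_calls_count", 0))
--         if out_degree == 0:
--             leaves.append(fqn)
--         elif in_degree >= 2 and out_degree <= 1:
--             roots.append(fqn)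
--         else:
--             middles.append(fqn)
--     leaves.sort(key=lambda f: (function_map[f].get("incoming_calls_count", 0), f))
--     middles.sort(key=lambda f: (function_map[f].get("outgoing_calls_count", 0), -int(function_map[f].get("incoming_calls_count", 0)), f))
--     roots.sort(key=lambda f: (-int(function_map[f].get("incoming_calls_count", 0)), int(function_map[f].get("outgoing_calls_count", 0)), f))
--     return [*leaves, *middles, *roots]
-- ===== SOURCE B (Python) =====
-- def _compute_modernization_priority(function_map):
--     # One unified sort: a single key function ranks each function into its
--     # bucket (leaves=0, middles=1, roots=2) and appends the bucket's sub-key.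
--     def key(f):
--         meta = function_map[f]
--         inc = int(meta.get("incoming_calls_count", 0))
--         out = int(meta.get("outgoing_calls_count", 0))
--         if out == 0:
--             return (0, meta.get("incoming_calls_count", 0), 0, f)
--         if inc >= 2 and out <= 1:
--             return (2, -inc, out, f)
--         return (1, out, -inc, f)
--     return sorted(function_map, key=key)
-- ===== Notes on version B (the rewrite author's own statement) =====
-- stated objective: simpler
-- what changed: Replaces the three explicit bucket lists, three separate stable sorts and a final concatenation by one sorted() call over the dict's keys with a unified (rank, sub-key) tuple key that encodes both the bucket classification and each bucket's ordering.
import Mathlib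
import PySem

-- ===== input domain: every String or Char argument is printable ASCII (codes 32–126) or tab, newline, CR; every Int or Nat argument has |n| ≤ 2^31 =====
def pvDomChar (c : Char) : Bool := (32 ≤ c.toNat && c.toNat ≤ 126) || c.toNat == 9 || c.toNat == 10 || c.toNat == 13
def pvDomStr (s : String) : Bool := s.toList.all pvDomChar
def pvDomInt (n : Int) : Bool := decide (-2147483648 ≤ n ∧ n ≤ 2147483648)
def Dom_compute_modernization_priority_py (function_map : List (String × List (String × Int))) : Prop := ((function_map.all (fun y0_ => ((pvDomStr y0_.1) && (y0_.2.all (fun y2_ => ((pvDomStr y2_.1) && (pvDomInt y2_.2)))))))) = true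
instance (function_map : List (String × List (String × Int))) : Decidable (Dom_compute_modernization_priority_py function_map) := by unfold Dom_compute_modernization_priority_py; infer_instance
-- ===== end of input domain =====

-- B replaces A's three bucket lists, three stable sorts and a concatenation by a
-- single sorted() over the keys with a unified (rank, sub-key) tuple key (objective: simpler).

-- ===== PORT A =====
-- meta.get("…", 0) — first-match association-list lookup with default (exact)
def pvInc (m : List (String × Int)) : Int := PySem.Dict.getD (PySem.Dict.mk m) "incoming_calls_count" 0
def pvOut (m : List (String × Int)) : Int := PySem.Dict.getD (PySem.Dict.mk m) "outgoing_calls_count" 0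
-- function_map[f]; every f looked up comes from function_map itself, so the [] default is never used
def pvLook (fm : List (String × List (String × Int))) (f : String) : List (String × Int) :=
  ((PySem.Dict.mk fm).get? f).getD []
-- Python's '<' on 2-/3-/4-tuples of ints and a string, written out (exact: lexicographic)
def pvLt2 (a b : Int × String) : Bool :=
  decide (a.1 < b.1) || (decide (a.1 = b.1) && decide (a.2 < b.2))
def pvLt3 (a b : Int × Int × String) : Bool :=
  decide (a.1 < b.1) || (decide (a.1 = b.1) && pvLt2 a.2 b.2)
def pvLt4 (a b : Int × Int × Int × String) : Bool :=
  decide (a.1 < b.1) || (decide (a.1 = b.1) && pvLt3 a.2 b.2)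
-- list.sort(key=…) with a tuple key IS PySem.List.sorted, spelled as its defining
-- insertion fold (PySem.List.sorted_eq_foldl_insertBy, a rfl-lemma) with the tuple '<'
-- written out, because the ×ₗ Decidable instances do not evaluate; proved equal to
-- PySem.List.sorted with the lexicographic key in the lemmas below.
def pvSortBy {α : Type} (lt : α → α → Bool) (xs : List α) : List α :=
  xs.foldl (fun acc x => PySem.List.insertBy lt x acc) []

def compute_modernization_priority_py (function_map : List (String × List (String × Int))) : List String :=
  -- the for-loop appending to leaves / roots / middles, as a fold over the triple
  let t := function_map.foldl
    (fun (acc : List String × List String × List String) e =>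
      let in_degree := pvInc e.2
      let out_degree := pvOut e.2
      if out_degree = 0 then (acc.1 ++ [e.1], acc.2.1, acc.2.2)
      else if 2 ≤ in_degree ∧ out_degree ≤ 1 then (acc.1, acc.2.1 ++ [e.1], acc.2.2)
      else (acc.1, acc.2.1, acc.2.2 ++ [e.1]))
    ([], [], [])
  let leaves := pvSortBy (fun a b => pvLt2 (pvInc (pvLook function_map a), a) (pvInc (pvLook function_map b), b)) t.1
  let middles := pvSortBy (fun a b => pvLt3
    (pvOut (pvLook function_map a), -(pvInc (pvLook function_map a)), a)
    (pvOut (pvLook function_map b), -(pvInc (pvLook function_map b)), b)) t.2.2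
  let roots := pvSortBy (fun a b => pvLt3
    (-(pvInc (pvLook function_map a)), pvOut (pvLook function_map a), a)
    (-(pvInc (pvLook function_map b)), pvOut (pvLook function_map b), b)) t.2.1
  leaves ++ middles ++ roots

-- ===== PORT B =====
-- Source B's key(f): rank 0/1/2 plus the bucket's sub-key, as one 4-tuple
-- (the leaves branch's raw meta.get equals the int()-ed value on this Int-valued map)
def pvKeyB (fm : List (String × List (String × Int))) (f : String) : Int × Int × Int × String :=
  let m := pvLook fm f
  if pvOut m = 0 then (0, pvInc m, 0, f)
  else if 2 ≤ pvInc m ∧ pvOut m ≤ 1 then (2, -(pvInc m), pvOut m, f)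
  else (1, pvOut m, -(pvInc m), f)

def compute_modernization_priority_py_alt (function_map : List (String × List (String × Int))) : List String :=
  pvSortBy (fun a b => pvLt4 (pvKeyB function_map a) (pvKeyB function_map b)) (function_map.map Prod.fst)

-- ===== PRECONDITION & SPEC =====
-- Pre_ excludes association lists with duplicate function names: a Python dict cannot
-- carry duplicate keys, so such lists correspond to no input of the original A.
def Pre_compute_modernization_priority_py (function_map : List (String × List (String × Int))) : Prop :=
  (function_map.map Prod.fst).Nodup
instance (function_map : List (String × List (String × Int))) : Decidable (Pre_compute_modernization_priority_py function_map) := by unfold Pre_compute_modernization_priority_py; infer_instance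
def pvWitness_compute_modernization_priority_py : (List (String × List (String × Int))) :=
  [("a", [("incoming_calls_count", 2), ("outgoing_calls_count", 1)]), ("b", [])]

def Spec_compute_modernization_priority_py (function_map : List (String × List (String × Int))) (out : List String) : Prop := out = compute_modernization_priority_py_alt function_map
instance (function_map : List (String × List (String × Int))) (out : List String) : Decidable (Spec_compute_modernization_priority_py function_map out) := by unfold Spec_compute_modernization_priority_py; infer_instance

-- ===== CLAIM (what is proved, stated in full; the proofs are below) =====
def Claim_equal_compute_modernization_priority_py : Prop := ∀ (function_map : List (String × List (String × Int))), Dom_compute_modernization_priority_py function_map → Pre_compute_modernization_priority_py function_map → Spec_compute_modernization_priority_py function_map (compute_modernization_priority_py function_map)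

-- ===== LEMMAS AND PROOFS =====

-- lexicographic Lex views of the tuple keys (proof-level only)
def pvToLex2 (t : Int × String) : Int ×ₗ String := toLex t
def pvToLex3 (t : Int × Int × String) : Int ×ₗ Int ×ₗ String := toLex (t.1, toLex t.2)
def pvToLex4 (t : Int × Int × Int × String) : Int ×ₗ Int ×ₗ Int ×ₗ String :=
  toLex (t.1, toLex (t.2.1, toLex t.2.2))

theorem pv_decide_aux (p q r : Prop) [Decidable p] [Decidable q] [Decidable r] :
    (decide p || (decide q && decide r)) = decide (p ∨ q ∧ r) := by
  by_cases hp : p <;> by_cases hq : q <;> by_cases hr : r <;> simp [hp, hq, hr]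
theorem pvLt2_eq (a b : Int × String) : pvLt2 a b = decide (pvToLex2 a < pvToLex2 b) := by
  simp only [pvLt2, pvToLex2, pv_decide_aux]
  simp [Prod.Lex.toLex_lt_toLex]
theorem pvLt3_eq (a b : Int × Int × String) : pvLt3 a b = decide (pvToLex3 a < pvToLex3 b) := by
  simp only [pvLt3, pvLt2_eq, pvToLex2, pvToLex3, pv_decide_aux]
  simp [Prod.Lex.toLex_lt_toLex]
theorem pvLt4_eq (a b : Int × Int × Int × String) : pvLt4 a b = decide (pvToLex4 a < pvToLex4 b) := by
  simp only [pvLt4, pvLt3_eq, pvToLex3, pvToLex4, pv_decide_aux]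
  simp [Prod.Lex.toLex_lt_toLex]

-- pvSortBy with a tuple comparison IS PySem.List.sorted with the Lex key
theorem pvSortBy_eq_sorted {α κ : Type} [LinearOrder κ] (key : α → κ)
    (lt : α → α → Bool) (hlt : ∀ a b, lt a b = decide (key a < key b)) (xs : List α) :
    pvSortBy lt xs = PySem.List.sorted xs key := by
  have : lt = fun a b => decide (key a < key b) := funext fun a => funext fun b => hlt a b
  rw [PySem.List.sorted_eq_foldl_insertBy, pvSortBy, this]

-- predicates of A's classification, on an entry (fqn, meta)
def pvQ0 (e : String × List (String × Int)) : Bool := decide (pvOut e.2 = 0)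
def pvQC (e : String × List (String × Int)) : Bool := decide (2 ≤ pvInc e.2 ∧ pvOut e.2 ≤ 1)

theorem pv_part (fm : List (String × List (String × Int))) (a b c : List String) :
    fm.foldl
      (fun (acc : List String × List String × List String) e =>
        if pvOut e.2 = 0 then (acc.1 ++ [e.1], acc.2.1, acc.2.2)
        else if 2 ≤ pvInc e.2 ∧ pvOut e.2 ≤ 1 then (acc.1, acc.2.1 ++ [e.1], acc.2.2)
        else (acc.1, acc.2.1, acc.2.2 ++ [e.1])) (a, b, c)
    = (a ++ (fm.filter pvQ0).map Prod.fst,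
       b ++ (fm.filter (fun e => !pvQ0 e && pvQC e)).map Prod.fst,
       c ++ (fm.filter (fun e => !pvQ0 e && !pvQC e)).map Prod.fst) := by
  induction fm generalizing a b c with
  | nil => simp
  | cons e t ih =>
    simp only [List.foldl_cons, List.filter_cons]
    by_cases h0 : pvOut e.2 = 0
    · simp [pvQ0, pvQC, h0, ih, List.append_assoc]
    · by_cases hc : 2 ≤ pvInc e.2 ∧ pvOut e.2 ≤ 1
      · simp [pvQ0, pvQC, h0, hc, ih, List.append_assoc]
      · simp [pvQ0, pvQC, h0, hc, ih, List.append_assoc]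

theorem pv_look_eq {fm : List (String × List (String × Int))} {f : String} {m : List (String × Int)}
    (hnd : (fm.map Prod.fst).Nodup) (hm : (f, m) ∈ fm) : pvLook fm f = m := by
  induction fm with
  | nil => cases hm
  | cons e t ih =>
    obtain ⟨k, v⟩ := e
    simp only [List.map_cons, List.nodup_cons] at hnd
    rcases List.mem_cons.mp hm with h | h
    · injection h with h1 h2; subst h1; subst h2
      simp [pvLook, PySem.Dict.get?_mk_cons]
    · have hne : k ≠ f := by
        intro he; exact hnd.1 (he ▸ (List.mem_map.mpr ⟨(f, m), h, rfl⟩))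
      have := ih hnd.2 h
      simpa [pvLook, PySem.Dict.get?_mk_cons, hne] using this

-- key shape of B's unified key on each bucket
theorem pv_keyB_leaf {fm : List (String × List (String × Int))} {f : String}
    (hnd : (fm.map Prod.fst).Nodup) (hf : f ∈ (fm.filter pvQ0).map Prod.fst) :
    pvKeyB fm f = (0, pvInc (pvLook fm f), 0, f) := by
  rcases List.mem_map.mp hf with ⟨e, he, rfl⟩
  have hq := List.of_mem_filter he
  have hl : pvLook fm e.1 = e.2 := pv_look_eq hnd (List.mem_of_mem_filter he)
  simp only [pvQ0, decide_eq_true_eq] at hq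
  simp [pvKeyB, hl, hq]

theorem pv_keyB_root {fm : List (String × List (String × Int))} {f : String}
    (hnd : (fm.map Prod.fst).Nodup) (hf : f ∈ (fm.filter (fun e => !pvQ0 e && pvQC e)).map Prod.fst) :
    pvKeyB fm f = (2, -(pvInc (pvLook fm f)), pvOut (pvLook fm f), f) := by
  rcases List.mem_map.mp hf with ⟨e, he, rfl⟩
  have hq := List.of_mem_filter he
  have hl : pvLook fm e.1 = e.2 := pv_look_eq hnd (List.mem_of_mem_filter he)
  simp only [Bool.and_eq_true, Bool.not_eq_true', pvQ0, pvQC, decide_eq_false_iff_not, decide_eq_true_eq] at hq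
  simp [pvKeyB, hl, hq.1, hq.2.1, hq.2.2]

theorem pv_keyB_mid {fm : List (String × List (String × Int))} {f : String}
    (hnd : (fm.map Prod.fst).Nodup) (hf : f ∈ (fm.filter (fun e => !pvQ0 e && !pvQC e)).map Prod.fst) :
    pvKeyB fm f = (1, pvOut (pvLook fm f), -(pvInc (pvLook fm f)), f) := by
  rcases List.mem_map.mp hf with ⟨e, he, rfl⟩
  have hq := List.of_mem_filter he
  have hl : pvLook fm e.1 = e.2 := pv_look_eq hnd (List.mem_of_mem_filter he)
  simp only [Bool.and_eq_true, Bool.not_eq_true', pvQ0, pvQC, decide_eq_false_iff_not] at hq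
  simp [pvKeyB, hl, hq.1, hq.2]

-- strictness helpers on the lex keys
theorem pv_strict2 {x y : Int} {a b : String}
    (h : toLex (x, a) ≤ toLex (y, b)) (hne : a ≠ b) :
    x < y ∨ x = y ∧ a < b := by
  rcases Prod.Lex.toLex_le_toLex.mp h with h | ⟨h1, h2⟩
  · exact Or.inl h
  · exact Or.inr ⟨h1, lt_of_le_of_ne h2 hne⟩

theorem pv_strict3 {x y u v : Int} {a b : String}
    (h : toLex (x, toLex (u, a)) ≤ toLex (y, toLex (v, b))) (hne : a ≠ b) :
    x < y ∨ x = y ∧ (u < v ∨ u = v ∧ a < b) := by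
  rcases Prod.Lex.toLex_le_toLex.mp h with h | ⟨h1, h2⟩
  · exact Or.inl h
  · exact Or.inr ⟨h1, pv_strict2 h2 hne⟩

theorem pv_main (fm : List (String × List (String × Int)))
    (hpre : (fm.map Prod.fst).Nodup) :
    compute_modernization_priority_py fm = compute_modernization_priority_py_alt fm := by
  -- the three bucket sorts of A, as PySem.List.sorted with Lex keys
  have hA : compute_modernization_priority_py fm
      = PySem.List.sorted ((fm.filter pvQ0).map Prod.fst)
          (fun f => pvToLex2 (pvInc (pvLook fm f), f))
        ++ PySem.List.sorted ((fm.filter (fun e => !pvQ0 e && !pvQC e)).map Prod.fst)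
          (fun f => pvToLex3 (pvOut (pvLook fm f), -(pvInc (pvLook fm f)), f))
        ++ PySem.List.sorted ((fm.filter (fun e => !pvQ0 e && pvQC e)).map Prod.fst)
          (fun f => pvToLex3 (-(pvInc (pvLook fm f)), pvOut (pvLook fm f), f)) := by
    simp only [compute_modernization_priority_py, pv_part, List.nil_append]
    rw [pvSortBy_eq_sorted (fun f => pvToLex2 (pvInc (pvLook fm f), f)) _ (fun a b => pvLt2_eq _ _),
        pvSortBy_eq_sorted (fun f => pvToLex3 (pvOut (pvLook fm f), -(pvInc (pvLook fm f)), f)) _ (fun a b => pvLt3_eq _ _),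
        pvSortBy_eq_sorted (fun f => pvToLex3 (-(pvInc (pvLook fm f)), pvOut (pvLook fm f), f)) _ (fun a b => pvLt3_eq _ _)]
  set L0 := (fm.filter pvQ0).map Prod.fst with hL0def
  set LM := (fm.filter (fun e => !pvQ0 e && !pvQC e)).map Prod.fst with hLMdef
  set LR := (fm.filter (fun e => !pvQ0 e && pvQC e)).map Prod.fst with hLRdef
  set S0 := PySem.List.sorted L0 (fun f => pvToLex2 (pvInc (pvLook fm f), f)) with hS0def
  set SM := PySem.List.sorted LM (fun f => pvToLex3 (pvOut (pvLook fm f), -(pvInc (pvLook fm f)), f)) with hSMdef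
  set SR := PySem.List.sorted LR (fun f => pvToLex3 (-(pvInc (pvLook fm f)), pvOut (pvLook fm f), f)) with hSRdef
  -- nodup of each bucket
  have hndL0 : L0.Nodup := hpre.sublist (List.filter_sublist.map Prod.fst)
  have hndLM : LM.Nodup := hpre.sublist (List.filter_sublist.map Prod.fst)
  have hndLR : LR.Nodup := hpre.sublist (List.filter_sublist.map Prod.fst)
  have hndS0 : S0.Nodup := ((PySem.List.sorted_perm _ _ _).nodup_iff).mpr hndL0
  have hndSM : SM.Nodup := ((PySem.List.sorted_perm _ _ _).nodup_iff).mpr hndLM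
  have hndSR : SR.Nodup := ((PySem.List.sorted_perm _ _ _).nodup_iff).mpr hndLR
  -- the permutation: S0 ++ SM ++ SR is a rearrangement of the key list
  have hpermBuckets : (L0 ++ LM ++ LR).Perm (fm.map Prod.fst) := by
    have h1 : (fm.filter (fun e => !pvQ0 e && !pvQC e))
        = (fm.filter (fun e => !pvQ0 e)).filter (fun e => !pvQC e) := by
      rw [List.filter_filter]
      exact (List.filter_congr (fun x _ => Bool.and_comm _ _)).symm
    have h2 : (fm.filter (fun e => !pvQ0 e && pvQC e))
        = (fm.filter (fun e => !pvQ0 e)).filter pvQC := by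
      rw [List.filter_filter]
      exact (List.filter_congr (fun x _ => Bool.and_comm _ _)).symm
    have h3 : ((fm.filter (fun e => !pvQ0 e)).filter (fun e => !pvQC e)
        ++ (fm.filter (fun e => !pvQ0 e)).filter pvQC).Perm (fm.filter (fun e => !pvQ0 e)) := by
      have := List.filter_append_perm (fun e => !pvQC e) (fm.filter (fun e => !pvQ0 e))
      have heq : (fm.filter (fun e => !pvQ0 e)).filter (fun x => !(!pvQC x))
          = (fm.filter (fun e => !pvQ0 e)).filter pvQC :=
        List.filter_congr (fun x _ => by simp)
      rwa [heq] at this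
    have h4 : (fm.filter pvQ0 ++ (fm.filter (fun e => !pvQ0 e && !pvQC e)
        ++ fm.filter (fun e => !pvQ0 e && pvQC e))).Perm fm := by
      rw [h1, h2]
      exact ((h3.append_left (fm.filter pvQ0)).trans (List.filter_append_perm pvQ0 fm))
    have := h4.map Prod.fst
    simpa [hL0def, hLMdef, hLRdef, List.append_assoc] using this
  have hperm : (S0 ++ SM ++ SR).Perm (fm.map Prod.fst) := by
    refine (List.Perm.trans ?_ hpermBuckets)
    exact ((PySem.List.sorted_perm _ _ _).append (PySem.List.sorted_perm _ _ _)).append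
      (PySem.List.sorted_perm _ _ _)
  -- key shapes on the sorted buckets
  have hmem0 : ∀ f ∈ S0, pvKeyB fm f = (0, pvInc (pvLook fm f), 0, f) := by
    intro f hf
    exact pv_keyB_leaf hpre ((PySem.List.mem_sorted _ _ _ _).mp hf)
  have hmemM : ∀ f ∈ SM, pvKeyB fm f = (1, pvOut (pvLook fm f), -(pvInc (pvLook fm f)), f) := by
    intro f hf
    exact pv_keyB_mid hpre ((PySem.List.mem_sorted _ _ _ _).mp hf)
  have hmemR : ∀ f ∈ SR, pvKeyB fm f = (2, -(pvInc (pvLook fm f)), pvOut (pvLook fm f), f) := by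
    intro f hf
    exact pv_keyB_root hpre ((PySem.List.mem_sorted _ _ _ _).mp hf)
  -- strict pairwise inside each sorted bucket, under B's unified key
  have hpw0 : S0.Pairwise (fun a b => pvToLex4 (pvKeyB fm a) < pvToLex4 (pvKeyB fm b)) := by
    have hle := PySem.List.sorted_pairwise L0 (fun f => pvToLex2 (pvInc (pvLook fm f), f))
    refine ((hle.and hndS0).imp_of_mem ?_)
    intro a b ha hb hab
    rw [hmem0 a ha, hmem0 b hb]
    simp only [pvToLex4, Prod.Lex.toLex_lt_toLex]
    rcases pv_strict2 hab.1 hab.2 with h | ⟨h1, h2⟩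
    · exact Or.inr ⟨by trivial, Or.inl h⟩
    · exact Or.inr ⟨by trivial, Or.inr ⟨h1, Or.inr ⟨by trivial, h2⟩⟩⟩
  have hpwM : SM.Pairwise (fun a b => pvToLex4 (pvKeyB fm a) < pvToLex4 (pvKeyB fm b)) := by
    have hle := PySem.List.sorted_pairwise LM
      (fun f => pvToLex3 (pvOut (pvLook fm f), -(pvInc (pvLook fm f)), f))
    refine ((hle.and hndSM).imp_of_mem ?_)
    intro a b ha hb hab
    rw [hmemM a ha, hmemM b hb]
    simp only [pvToLex4, Prod.Lex.toLex_lt_toLex]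
    rcases pv_strict3 hab.1 hab.2 with h | ⟨h1, h2⟩
    · exact Or.inr ⟨by trivial, Or.inl h⟩
    · exact Or.inr ⟨by trivial, Or.inr ⟨h1, h2⟩⟩
  have hpwR : SR.Pairwise (fun a b => pvToLex4 (pvKeyB fm a) < pvToLex4 (pvKeyB fm b)) := by
    have hle := PySem.List.sorted_pairwise LR
      (fun f => pvToLex3 (-(pvInc (pvLook fm f)), pvOut (pvLook fm f), f))
    refine ((hle.and hndSR).imp_of_mem ?_)
    intro a b ha hb hab
    rw [hmemR a ha, hmemR b hb]
    simp only [pvToLex4, Prod.Lex.toLex_lt_toLex]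
    rcases pv_strict3 hab.1 hab.2 with h | ⟨h1, h2⟩
    · exact Or.inr ⟨by trivial, Or.inl h⟩
    · exact Or.inr ⟨by trivial, Or.inr ⟨h1, h2⟩⟩
  -- whole concatenation is strictly increasing under B's unified key
  have hpw : (S0 ++ SM ++ SR).Pairwise (fun a b => pvToLex4 (pvKeyB fm a) < pvToLex4 (pvKeyB fm b)) := by
    rw [List.append_assoc, List.pairwise_append]
    refine ⟨hpw0, ?_, ?_⟩
    · rw [List.pairwise_append]
      refine ⟨hpwM, hpwR, ?_⟩
      intro a ha b hb
      rw [hmemM a ha, hmemR b hb]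
      simp only [pvToLex4, Prod.Lex.toLex_lt_toLex]
      exact Or.inl (by norm_num)
    · intro a ha b hb
      rw [hmem0 a ha]
      rcases List.mem_append.mp hb with hb | hb
      · rw [hmemM b hb]
        simp only [pvToLex4, Prod.Lex.toLex_lt_toLex]
        exact Or.inl (by norm_num)
      · rw [hmemR b hb]
        simp only [pvToLex4, Prod.Lex.toLex_lt_toLex]
        exact Or.inl (by norm_num)
  have hB : compute_modernization_priority_py_alt fm = S0 ++ SM ++ SR := by
    unfold compute_modernization_priority_py_alt
    rw [pvSortBy_eq_sorted (fun f => pvToLex4 (pvKeyB fm f)) _ (fun a b => pvLt4_eq _ _)]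
    exact PySem.List.sorted_eq_of_perm_of_pairwise_lt _ _ _ hperm hpw
  rw [hA, hB]

-- ===== VERDICT (by name: the statement is the Claim_ definition above) =====
theorem compute_modernization_priority_py_spec : Claim_equal_compute_modernization_priority_py := by
  intro fm _ hpre
  exact pv_main fm hpre
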